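-- pv_equiv track=rewrite | github.com/chrislit/abydos | abydos/_bm.py | _bm_pnums_with_leading_space
-- ===== SOURCE A (Python) =====
-- def _bm_phonetic_number(phonetic):
--     """Remove bracketed text from the end of a string.
--
--     :param str phonetic: a Beider-Morse phonetic encoding
--     """
--     if '[' in phonetic:
--         return phonetic[:phonetic.find('[')]
--
--     return phonetic  # experimental !!!!
--
-- def _bm_pnums_with_leading_space(phonetic):
--     """Join prefixes & suffixes in cases of alternate phonetic values.
--
--     :param str phonetic: a Beider-Morse phonetic encoding
--     """
--     alt_start = phonetic.find('(')
--     if alt_start == -1: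
--         return ' ' + _bm_phonetic_number(phonetic)
--
--     prefix = phonetic[:alt_start]
--     alt_start += 1  # get past the (
--     alt_end = phonetic.find(')', alt_start)
--     alt_string = phonetic[alt_start:alt_end]
--     alt_end += 1  # get past the )
--     suffix = phonetic[alt_end:]
--     alt_array = alt_string.split('|')
--     result = ''
--     for alt in alt_array:
--         result += _bm_pnums_with_leading_space(prefix+alt+suffix)
--
--     return result
-- ===== SOURCE B (Python) =====
-- def _bm_phonetic_number(phonetic):
--     """Remove bracketed text from the end of a string."""
--     if '[' in phonetic:
--         return phonetic[:phonetic.find('[')]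
--     return phonetic
--
--
-- def _bm_pnums_with_leading_space(phonetic):
--     """Join prefixes & suffixes in cases of alternate phonetic values.
--
--     Iterative: one left-to-right parse maintaining the list of partial
--     expansions (cartesian-product fold), then format every leaf in one pass.
--     """
--     expansions = ['']
--     rest = phonetic
--     while True:
--         i = rest.find('(')
--         if i == -1:
--             break
--         j = rest.find(')', i + 1)
--         if j == -1:
--             break
--         prefix = rest[:i]
--         alts = rest[i + 1:j].split('|')
--         expansions = [e + prefix + a for e in expansions for a in alts]
--         rest = rest[j + 1:]
--     return ''.join(' ' + _bm_phonetic_number(e + rest) for e in expansions)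
-- ===== Notes on version B (the rewrite author's own statement) =====
-- stated objective: alternative
-- what changed: Replaces A's branching recursion (which re-expands the suffix once per alternative) with a single iterative left-to-right parse that maintains the list of partial expansions as a cartesian-product fold, then formats all leaves in one pass.
-- outside the precondition, e.g. on _bm_pnums_with_leading_space('((a))'): A returns ' a', B returns ' (a)'
import Mathlib
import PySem

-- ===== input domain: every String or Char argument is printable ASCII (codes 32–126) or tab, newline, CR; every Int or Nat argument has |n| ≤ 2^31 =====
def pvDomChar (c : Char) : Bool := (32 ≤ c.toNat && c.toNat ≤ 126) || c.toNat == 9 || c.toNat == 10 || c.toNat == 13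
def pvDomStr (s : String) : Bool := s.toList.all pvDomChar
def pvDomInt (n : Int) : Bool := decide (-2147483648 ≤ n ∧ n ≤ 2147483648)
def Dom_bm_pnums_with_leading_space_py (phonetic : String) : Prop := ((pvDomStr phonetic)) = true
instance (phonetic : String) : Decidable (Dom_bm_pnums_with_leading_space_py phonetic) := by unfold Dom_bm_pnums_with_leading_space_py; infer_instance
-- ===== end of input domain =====

-- B replaces A's branching recursion by one iterative left-to-right parse that folds a
-- cartesian product of partial expansions; RETURN value equivalence is proved on Pre_.

-- ===== PORT A =====

-- exact port of Python str.find(ch) on the character list: some i = first index, none = -1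
def findC (c : Char) : List Char → Option Nat
  | [] => none
  | x :: t => if x = c then some 0 else (findC c t).map (· + 1)

-- exact port of Python str.split(sep) for a single-character separator ("".split(sep) = [""])
def mySplit (sep : Char) : List Char → List (List Char)
  | [] => [[]]
  | c :: t =>
    if c = sep then [] :: mySplit sep t
    else
      match mySplit sep t with
      | [] => [[c]]
      | h :: r => (c :: h) :: r

-- port of _bm_phonetic_number ('[' in s ↔ s.find('[') ≠ -1)
def pnL (s : List Char) : List Char :=
  match findC '[' s with
  | some i => s.take i
  | none => s

theorem findC_some_lt {c : Char} : ∀ {l : List Char} {i : Nat}, findC c l = some i → i < l.length := by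
  intro l
  induction l with
  | nil => intro i h; simp [findC] at h
  | cons x t ih =>
    intro i h
    simp only [findC] at h
    by_cases hx : x = c
    · simp [hx] at h; simp [List.length_cons]; omega
    · simp [hx] at h
      obtain ⟨j, hj, hji⟩ := h
      have := ih hj
      simp; omega

-- recursion of _bm_pnums_with_leading_space, with fuel (inside Pre_ every recursive
-- argument is at least 2 shorter, so fuel = length + 1 is never exhausted).
-- phonetic.find(')', alt_start) is ported as findC ')' on the tail after the '(';
-- the two slices phonetic[alt_start:alt_end] and phonetic[alt_end:] become the
-- corresponding take/drop of that tail (same characters).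
def aRec : Nat → List Char → List Char
  | 0, _ => []
  | f + 1, s =>
    match findC '(' s with
    | none => ' ' :: pnL s
    | some p =>
      let pre := s.take p
      let rest := s.drop (p + 1)
      match findC ')' rest with
      | none =>
        -- Python: alt_end = -1; alt_string = phonetic[alt_start:-1]; suffix = phonetic[0:]
        (mySplit '|' rest.dropLast).foldl (fun acc a => acc ++ aRec f (pre ++ a ++ s)) []
      | some q =>
        (mySplit '|' (rest.take q)).foldl (fun acc a => acc ++ aRec f (pre ++ a ++ rest.drop (q + 1))) []

def bm_pnums_with_leading_space_py (phonetic : String) : String :=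
  String.ofList (aRec (phonetic.toList.length + 1) phonetic.toList)

-- ===== PORT B =====

-- the while loop of B: maintains the partial-expansion list, consumes one (…|…) group per step
def bLoop (exps : List (List Char)) (rest : List Char) : List (List Char) :=
  match h1 : findC '(' rest with
  | none => exps.map (· ++ rest)
  | some i =>
    match findC ')' (rest.drop (i + 1)) with
    | none => exps.map (· ++ rest)
    | some j =>
      bLoop
        (exps.flatMap fun e => (mySplit '|' ((rest.drop (i + 1)).take j)).map fun a => e ++ rest.take i ++ a)
        ((rest.drop (i + 1)).drop (j + 1))
termination_by rest.length
decreasing_by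
  have := findC_some_lt h1
  simp; omega

def bm_pnums_with_leading_space_py_alt (phonetic : String) : String :=
  String.ofList (((bLoop [[]] phonetic.toList).map fun e => ' ' :: pnL e).flatten)

-- ===== PRECONDITION & SPEC =====

-- scanner for Pre_: state false = outside a group, true = after an unclosed '('
def okS : Bool → List Char → Bool
  | false, [] => true
  | true, [] => false
  | false, c :: t => if c = '(' then okS true t else okS false t
  | true, c :: t => if c = ')' then okS false t else if c = '(' then false else okS true t

-- Pre_ excludes strings with nested or unmatched '(' groups: there A's repeated
-- first-'('/first-')' re-parsing either recurses forever (RecursionError) or returns an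
-- accidental value of the re-parsed text, neither of which is the function's purpose.
def Pre_bm_pnums_with_leading_space_py (phonetic : String) : Prop :=
  okS false phonetic.toList = true

instance (phonetic : String) : Decidable (Pre_bm_pnums_with_leading_space_py phonetic) := by
  unfold Pre_bm_pnums_with_leading_space_py; infer_instance

def pvWitness_bm_pnums_with_leading_space_py : String := "a(b|c)d[x](e|)f"

def Spec_bm_pnums_with_leading_space_py (phonetic : String) (out : String) : Prop := out = bm_pnums_with_leading_space_py_alt phonetic
instance (phonetic : String) (out : String) : Decidable (Spec_bm_pnums_with_leading_space_py phonetic out) := by unfold Spec_bm_pnums_with_leading_space_py; infer_instance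

-- ===== CLAIM (what is proved, stated in full; the proofs are below) =====
def Claim_equal_bm_pnums_with_leading_space_py : Prop := ∀ (phonetic : String), Dom_bm_pnums_with_leading_space_py phonetic → Pre_bm_pnums_with_leading_space_py phonetic → Spec_bm_pnums_with_leading_space_py phonetic (bm_pnums_with_leading_space_py phonetic)

-- ===== LEMMAS AND PROOFS =====

theorem findC_take_ne {c : Char} : ∀ {l : List Char} {i : Nat}, findC c l = some i → ∀ x ∈ l.take i, x ≠ c := by
  intro l
  induction l with
  | nil => intro i h; simp [findC] at h
  | cons y t ih =>
    intro i h
    simp only [findC] at h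
    by_cases hy : y = c
    · simp [hy] at h
      subst h
      simp
    · simp only [hy, if_false, Option.map_eq_some_iff] at h
      obtain ⟨j, hj, hji⟩ := h
      subst hji
      intro x hx
      simp only [List.take_succ_cons, List.mem_cons] at hx
      rcases hx with rfl | hx
      · exact hy
      · exact ih hj x hx

theorem findC_append_of_ne {c : Char} : ∀ {w : List Char} (r : List Char), (∀ x ∈ w, x ≠ c) →
    findC c (w ++ r) = (findC c r).map (w.length + ·) := by
  intro w
  induction w with
  | nil => intro r _; simp [Option.map_id']
  | cons y t ih =>
    intro r hw
    have hy : y ≠ c := hw y (by simp)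
    simp only [List.cons_append, findC, hy, if_false]
    rw [ih r (fun x hx => hw x (by simp [hx]))]
    cases findC c r <;> simp
    omega

theorem mySplit_mem {sep : Char} : ∀ {l a : List Char}, a ∈ mySplit sep l → (∀ x ∈ a, x ∈ l) ∧ a.length ≤ l.length := by
  intro l
  induction l with
  | nil => intro a ha; simp [mySplit] at ha; subst ha; simp
  | cons y t ih =>
    intro a ha
    simp only [mySplit] at ha
    by_cases hy : y = sep
    · simp only [hy, if_true, List.mem_cons] at ha
      rcases ha with rfl | ha
      · simp
      · obtain ⟨h1, h2⟩ := ih ha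
        exact ⟨fun x hx => by simp [h1 x hx], by simp; omega⟩
    · simp only [hy, if_false] at ha
      rcases hm : mySplit sep t with _ | ⟨h, r⟩
      · simp [hm] at ha; subst ha; simp
      · simp only [hm, List.mem_cons] at ha
        rcases ha with rfl | ha
        · have := ih (a := h) (by simp [hm])
          refine ⟨?_, by simp; omega⟩
          intro x hx
          simp only [List.mem_cons] at hx
          rcases hx with rfl | hx
          · simp
          · simp [this.1 x hx]
        · have := ih (a := a) (by simp [hm, ha])
          exact ⟨fun x hx => by simp [this.1 x hx], by simp; omega⟩

theorem okS_prepend {m : List Char} : ∀ {w : List Char}, (∀ x ∈ w, x ≠ '(') → okS false (w ++ m) = okS false m := by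
  intro w
  induction w with
  | nil => intro _; simp
  | cons y t ih =>
    intro hw
    have hy : y ≠ '(' := hw y (by simp)
    simp only [List.cons_append, okS, hy, if_false]
    exact ih (fun x hx => hw x (by simp [hx]))

theorem okS_true_struct : ∀ {t : List Char}, okS true t = true →
    ∃ q, findC ')' t = some q ∧ (∀ x ∈ t.take q, x ≠ '(') ∧ okS false (t.drop (q + 1)) = true := by
  intro t
  induction t with
  | nil => intro h; simp [okS] at h
  | cons y t ih =>
    intro h
    simp only [okS] at h
    by_cases hy : y = ')'
    · refine ⟨0, by simp [findC, hy], by simp, ?_⟩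
      simpa [hy] using h
    · by_cases hy2 : y = '('
      · simp [hy2] at h
      · simp only [hy, hy2, if_false] at h
        obtain ⟨q, hq, hne, hok⟩ := ih h
        refine ⟨q + 1, by simp [findC, hy, hq], ?_, by simpa using hok⟩
        intro x hx
        simp only [List.take_succ_cons, List.mem_cons] at hx
        rcases hx with rfl | hx
        · exact hy2
        · exact hne x hx

theorem okS_false_struct : ∀ {s : List Char} {p : Nat}, okS false s = true → findC '(' s = some p →
    okS true (s.drop (p + 1)) = true := by
  intro s
  induction s with
  | nil => intro p _ h; simp [findC] at h
  | cons y t ih =>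
    intro p hok h
    simp only [findC] at h
    by_cases hy : y = '('
    · simp [hy] at h
      subst h
      simpa [okS, hy] using hok
    · simp only [hy, if_false, Option.map_eq_some_iff] at h
      obtain ⟨j, hj, hji⟩ := h
      subst hji
      simp only [okS, hy, if_false] at hok
      simpa using ih hok hj

theorem foldl_append_flatten {α β : Type} (l : List α) (f : α → List β) :
    l.foldl (fun acc a => acc ++ f a) [] = (l.map f).flatten := by
  simp

theorem flatten_map_flatMap {α β γ : Type} (l : List α) (g : α → List β) (h : β → List γ) :
    ((l.flatMap g).map h).flatten = (l.map fun a => ((g a).map h).flatten).flatten := by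
  induction l with
  | nil => simp
  | cons y t ih => simp [ih]

theorem flatten_map_single {α β : Type} (l : List α) (f : α → List β) :
    (l.map fun e => [f e]).flatten = l.map f := by
  induction l with
  | nil => simp
  | cons e t ih => simp [ih]

theorem bLoop_absorb {w : List Char} (hw : ∀ x ∈ w, x ≠ '(') (exps : List (List Char)) (rest : List Char) :
    bLoop exps (w ++ rest) = bLoop (exps.map (· ++ w)) rest := by
  conv_lhs => rw [bLoop.eq_def]
  conv_rhs => rw [bLoop.eq_def]
  rw [findC_append_of_ne rest hw]
  cases hf : findC '(' rest with
  | none => simp [List.map_map, Function.comp_def, List.append_assoc]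
  | some i =>
    simp only [Option.map_some]
    have hd1 : List.drop (w.length + i + 1) w = [] := List.drop_eq_nil_of_le (by omega)
    have ha1 : w.length + i + 1 - w.length = i + 1 := by omega
    have ht1 : List.take (w.length + i) w = w := List.take_of_length_le (by omega)
    have ha2 : w.length + i - w.length = i := by omega
    rw [List.drop_append, hd1, ha1, List.take_append, ht1, ha2, List.nil_append]
    cases hg : findC ')' (rest.drop (i + 1)) with
    | none => simp [List.map_map, Function.comp_def, List.append_assoc]
    | some j =>
      simp [List.flatMap_map, List.append_assoc]

theorem bLoop_hom : ∀ (rest : List Char) (exps : List (List Char)),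
    bLoop exps rest = exps.flatMap fun e => (bLoop [[]] rest).map (e ++ ·) := by
  suffices H : ∀ (n : Nat) (rest : List Char), rest.length ≤ n → ∀ exps,
      bLoop exps rest = exps.flatMap fun e => (bLoop [[]] rest).map (e ++ ·) by
    exact fun rest exps => H rest.length rest le_rfl exps
  intro n
  induction n with
  | zero =>
    intro rest hlen exps
    have : rest = [] := List.eq_nil_of_length_eq_zero (by omega)
    subst this
    rw [bLoop.eq_def, bLoop.eq_def]
    simp only [findC]
    simp [List.flatMap_def, flatten_map_single]
  | succ n ih =>
    intro rest hlen exps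
    rw [bLoop.eq_def]
    conv_rhs => rw [bLoop.eq_def]
    cases hf : findC '(' rest with
    | none =>
      simp
      rw [List.flatMap_def, flatten_map_single]
    | some i =>
      cases hg : findC ')' (rest.drop (i + 1)) with
      | none =>
        simp only [hg]
        simp
        rw [List.flatMap_def, flatten_map_single]
      | some j =>
        simp only [hg]
        have hi := findC_some_lt hf
        have hlen' : ((rest.drop (i + 1)).drop (j + 1)).length ≤ n := by
          simp; omega
        simp only [List.flatMap_cons, List.flatMap_nil, List.nil_append, List.append_nil]
        conv_rhs => rw [ih _ hlen']
        conv_lhs => rw [ih _ hlen']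
        simp [List.flatMap_assoc, List.flatMap_map, List.map_flatMap, List.map_map,
          Function.comp_def, List.append_assoc]

theorem aRec_eq_b : ∀ (f : Nat) (s : List Char), okS false s = true → s.length < f →
    aRec f s = ((bLoop [[]] s).map fun e => ' ' :: pnL e).flatten := by
  intro f
  induction f with
  | zero => intro s _ h; omega
  | succ f ih =>
    intro s hok hlen
    cases hf : findC '(' s with
    | none =>
      simp only [aRec, hf]
      rw [bLoop.eq_def]
      split
      · simp [pnL]
      · rename_i heq; rw [hf] at heq; cases heq
    | some p =>
      have hp := findC_some_lt hf
      obtain ⟨q, hq, haltne, hsufok⟩ := okS_true_struct (okS_false_struct hok hf)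
      have hq' := findC_some_lt hq
      simp only [aRec, hf, hq]
      rw [foldl_append_flatten]
      rw [bLoop.eq_def]
      split
      · rename_i heq; rw [hf] at heq; cases heq
      rename_i i heq
      rw [hf] at heq
      injection heq with heq
      subst heq
      simp only [hq]
      rw [bLoop_hom]
      have hmap : ∀ a ∈ mySplit '|' ((s.drop (p + 1)).take q),
          aRec f (s.take p ++ a ++ (s.drop (p + 1)).drop (q + 1)) =
            ((bLoop [[]] ((s.drop (p + 1)).drop (q + 1))).map
              fun x => ' ' :: pnL (s.take p ++ a ++ x)).flatten := by
        intro a ha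
        obtain ⟨hamem, halen⟩ := mySplit_mem ha
        have hpa : ∀ x ∈ s.take p ++ a, x ≠ '(' := by
          intro x hx
          rcases List.mem_append.mp hx with hx | hx
          · exact findC_take_ne hf x hx
          · exact haltne x (hamem x hx)
        have hok2 : okS false (s.take p ++ a ++ (s.drop (p + 1)).drop (q + 1)) = true := by
          rw [List.append_assoc, ← List.append_assoc, okS_prepend hpa]
          exact hsufok
        have hlen2 : (s.take p ++ a ++ (s.drop (p + 1)).drop (q + 1)).length < f := by
          simp only [List.length_append, List.length_take, List.length_drop]
          simp only [List.length_take, List.length_drop] at halen hq'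
          omega
        rw [ih _ hok2 hlen2]
        rw [show s.take p ++ a ++ (s.drop (p + 1)).drop (q + 1)
              = (s.take p ++ a) ++ (s.drop (p + 1)).drop (q + 1) from by simp [List.append_assoc]]
        rw [bLoop_absorb hpa]
        rw [bLoop_hom]
        simp [List.map_map, Function.comp_def, List.append_assoc]
      rw [List.map_congr_left hmap]
      rw [flatten_map_flatMap]
      simp [List.map_map, Function.comp_def, List.append_assoc]

-- ===== VERDICT (by name: the statement is the Claim_ definition above) =====
theorem bm_pnums_with_leading_space_py_spec : Claim_equal_bm_pnums_with_leading_space_py := by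
  intro phonetic _ hpre
  unfold Spec_bm_pnums_with_leading_space_py bm_pnums_with_leading_space_py bm_pnums_with_leading_space_py_alt
  exact congrArg String.ofList (aRec_eq_b _ _ hpre (Nat.lt_succ_self _))
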